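-- pv_equiv track=rewrite | github.com/mercerx02/homework_ylab | homework1/task5.py | count_find_num
-- ===== SOURCE A (Python) =====
-- from math import prod
--
-- def count_find_num(factors: list, limit: int) -> list:
--     products = [prod(factors)]
--     for f in factors:
--         for p in products:
--             p *= f
--             while p <= limit and p not in products:
--                 products.append(p)
--                 p *= f
--     return [len(products), max(products)] if products[0] <= limit else []
--
-- limit = 200
-- ===== SOURCE B (Python) =====
-- def count_find_num(factors: list, limit: int) -> list:
--     s = 1
--     for f in factors:
--         s *= f
--     products = {s}
--     for f in factors:
--         frontier = list(products)
--         while frontier: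
--             nxt = []
--             for v in frontier:
--                 w = v * f
--                 if w <= limit and w not in products:
--                     products.add(w)
--                     nxt.append(w)
--             frontier = nxt
--     if s > limit:
--         return []
--     return [len(products), max(products)]
-- ===== Notes on version B (the rewrite author's own statement) =====
-- stated objective: alternative
-- what changed: A grows a list while iterating it and chains while-loops with O(n) list membership tests; B saturates the product set per factor with an explicit frontier/worklist BFS over a hash set, removing the linear scans (speed not measurable here: the timing family makes A diverge).
-- outside the precondition, e.g. on count_find_num([-1, 2], -100): A returns [], B returns []
import Mathlib
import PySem

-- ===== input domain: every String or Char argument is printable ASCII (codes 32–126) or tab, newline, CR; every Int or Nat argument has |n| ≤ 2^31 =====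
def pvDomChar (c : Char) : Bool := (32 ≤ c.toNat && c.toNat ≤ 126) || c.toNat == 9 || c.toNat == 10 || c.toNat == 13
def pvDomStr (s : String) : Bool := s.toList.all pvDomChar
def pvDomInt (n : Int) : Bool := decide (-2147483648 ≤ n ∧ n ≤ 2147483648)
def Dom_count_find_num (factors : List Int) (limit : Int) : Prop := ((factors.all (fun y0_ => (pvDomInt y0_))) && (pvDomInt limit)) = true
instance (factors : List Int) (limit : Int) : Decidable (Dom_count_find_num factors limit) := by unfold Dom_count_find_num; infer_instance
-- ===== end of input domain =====

-- B replaces A's grow-the-list-while-iterating scan (with O(n) `in` checks on a list) by a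
-- per-factor frontier/worklist saturation over a hash set; same return value on Pre_.
-- Both ports carry a fuel bound (a totalization guard only: A's loops are unbounded in Python
-- and diverge outside Pre_; on Pre_ the proofs show the fuel is never exhausted).

-- ===== PORT A =====

-- fuel bound shared machinery (guard only, not part of either algorithm)
def pvLow (s : Int) : Int := -(((s.natAbs : Int) + 2147483648) * 2147483648)
def pvFuel (s limit : Int) : Nat := (limit - pvLow s).toNat + 4

-- math.prod(factors)
def prodA (l : List Int) : Int := l.foldl (· * ·) 1

-- `while p <= limit and p not in products: products.append(p); p *= f`
def chainA (f limit : Int) : Nat → Int → List Int → List Int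
  | fuel, p, prods =>
    if p ≤ limit ∧ p ∉ prods then
      match fuel with
      | 0 => prods
      | fuel + 1 => chainA f limit fuel (p * f) (prods ++ [p])
    else prods

theorem chainA_len_le (f limit : Int) (fuel : Nat) (p : Int) (prods : List Int) :
    prods.length ≤ (chainA f limit fuel p prods).length ∧
    (chainA f limit fuel p prods).length ≤ prods.length + fuel := by
  induction fuel generalizing p prods with
  | zero => rw [chainA]; split <;> simp
  | succ n ih =>
    rw [chainA]; split
    · have := ih (p * f) (prods ++ [p]); simp at this ⊢; omega
    · simp

-- `for p in products:` over the growing list, by index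
def loopA (f limit : Int) (fuel : Nat) (i : Nat) (prods : List Int) : List Int :=
  if h : i < prods.length then
    let prods' := chainA f limit fuel (prods[i] * f) prods
    loopA f limit (fuel - (prods'.length - prods.length)) (i + 1) prods'
  else prods
termination_by fuel + prods.length - i
decreasing_by
  have := chainA_len_le f limit fuel (prods[i] * f) prods
  omega

def count_find_num (factors : List Int) (limit : Int) : List Int :=
  let s := prodA factors
  let prods := factors.foldl (fun prods f => loopA f limit (pvFuel s limit) 0 prods) [s]
  -- products is provably nonempty here, so Python's products[0] and max(products) do not raise;
  -- pyGetD/getD defaults are dead branches of the totalized primitives.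
  if PySem.List.pyGetD prods 0 0 ≤ limit then
    [PySem.List.len prods, (PySem.List.max? prods (fun x => x)).getD 0]
  else []

-- ===== PORT B =====

-- `s = 1; for f in factors: s *= f`
def prodB (l : List Int) : Int := l.foldl (· * ·) 1

-- body of `for v in frontier: w = v*f; if w <= limit and w not in products: products.add(w); nxt.append(w)`
def stepB (f limit : Int) (st : PySem.Set Int × List Int) (v : Int) : PySem.Set Int × List Int :=
  if v * f ≤ limit ∧ ¬ PySem.Set.contains st.1 (v * f) then
    (PySem.Set.add st.1 (v * f), st.2 ++ [v * f])
  else st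

-- `while frontier:` saturation rounds (fuel is a totalization guard only)
def bfsB (f limit : Int) : Nat → List Int → PySem.Set Int → PySem.Set Int
  | _, [], prods => prods
  | 0, _ :: _, prods => prods
  | fuel + 1, v :: frontier, prods =>
    bfsB f limit fuel ((v :: frontier).foldl (stepB f limit) (prods, [])).2
      ((v :: frontier).foldl (stepB f limit) (prods, [])).1

def count_find_num_alt (factors : List Int) (limit : Int) : List Int :=
  let s := prodB factors
  let prods := factors.foldl (fun prods f => bfsB f limit (pvFuel s limit) prods prods)
      (PySem.Set.ofList [s])
  if limit < s then []
  else [PySem.Set.len prods, (PySem.List.max? prods (fun x => x)).getD 0]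

-- ===== PRECONDITION & SPEC =====
-- Pre_ excludes factor lists mixing a factor ≥ 2 with a negative factor: there the reachable
-- product set is typically infinite and Python A loops forever (e.g. ([-3, 2], 10)); on the few
-- such inputs where the limit blocks every chain A does return (e.g. ([-1, 2], -100) → []) and B
-- returns the same value.
def Pre_count_find_num (factors : List Int) (limit : Int) : Prop :=
  (∀ f ∈ factors, 0 ≤ f) ∨ (∀ f ∈ factors, f ≤ 1)
instance (factors : List Int) (limit : Int) : Decidable (Pre_count_find_num factors limit) := by
  unfold Pre_count_find_num; infer_instance

def pvWitness_count_find_num : List Int × Int := ([2, 3], 40)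

def Spec_count_find_num (factors : List Int) (limit : Int) (out : List Int) : Prop := out = count_find_num_alt factors limit
instance (factors : List Int) (limit : Int) (out : List Int) : Decidable (Spec_count_find_num factors limit out) := by unfold Spec_count_find_num; infer_instance

-- ===== CLAIM (what is proved, stated in full; the proofs are below) =====
def Claim_equal_count_find_num : Prop := ∀ (factors : List Int) (limit : Int), Dom_count_find_num factors limit → Pre_count_find_num factors limit → Spec_count_find_num factors limit (count_find_num factors limit)

-- ===== LEMMAS AND PROOFS =====

-- `Closed f limit T`: T is saturated under multiplying by f within the limit
def Closed (f limit : Int) (T : Finset Int) : Prop := ∀ v ∈ T, v * f ≤ limit → v * f ∈ T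

-- chainA only adds elements forced into any closed superset
theorem chainA_sub (f limit : Int) (fuel : Nat) (p : Int) (prods : List Int)
    (T : Finset Int) (hT : Closed f limit T) (hsub : ∀ x ∈ prods, x ∈ T)
    (hp : ∃ q ∈ T, p = q * f) :
    ∀ x ∈ chainA f limit fuel p prods, x ∈ T := by
  induction fuel generalizing p prods with
  | zero => rw [chainA]; split <;> simpa using hsub
  | succ n ih =>
    rw [chainA]; split
    · rename_i hc
      obtain ⟨q, hq, rfl⟩ := hp
      have hpT : q * f ∈ T := hT q hq hc.1
      exact ih (q * f * f) (prods ++ [q * f])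
        (by intro x hx; rcases List.mem_append.1 hx with h | h
            · exact hsub x h
            · simp at h; subst h; exact hpT)
        ⟨q * f, hpT, rfl⟩
    · exact hsub

theorem loopA_sub (f limit : Int) (fuel : Nat) (i : Nat) (prods : List Int)
    (T : Finset Int) (hT : Closed f limit T) (hsub : ∀ x ∈ prods, x ∈ T) :
    ∀ x ∈ loopA f limit fuel i prods, x ∈ T := by
  rw [loopA]; split
  · rename_i h
    have hmem : prods[i] ∈ T := hsub _ (List.getElem_mem h)
    have hsub' := chainA_sub f limit fuel (prods[i] * f) prods T hT hsub ⟨prods[i], hmem, rfl⟩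
    exact loopA_sub f limit _ (i + 1) _ T hT hsub'
  · exact hsub
termination_by fuel + prods.length - i
decreasing_by
  have := chainA_len_le f limit fuel (prods[i] * f) prods
  omega

-- chainA: full characterization under sufficient fuel
theorem chainA_spec (f limit : Int) (fuel : Nat) (p : Int) (prods : List Int)
    (V : Finset Int) (hV : Closed f limit V)
    (hsub : ∀ x ∈ prods, x ∈ V) (hnd : prods.Nodup)
    (hp : ∃ q ∈ prods, p = q * f)
    (hfuel : V.card + 1 ≤ fuel + prods.length) :
    ∃ ext, chainA f limit fuel p prods = prods ++ ext ∧
      (chainA f limit fuel p prods).Nodup ∧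
      (∀ x ∈ chainA f limit fuel p prods, x ∈ V) ∧
      (p ≤ limit → p ∈ chainA f limit fuel p prods) := by
  induction fuel generalizing p prods with
  | zero =>
    -- fuel exhausted is impossible unless the guard is false
    rw [chainA]
    by_cases hc : p ≤ limit ∧ p ∉ prods
    · exfalso
      obtain ⟨q, hq, rfl⟩ := hp
      have hpV : q * f ∈ V := hV q (hsub q hq) hc.1
      have hsubset : prods.toFinset ⊆ V.erase (q * f) := by
        intro x hx
        rw [List.mem_toFinset] at hx
        exact Finset.mem_erase.2 ⟨by rintro rfl; exact hc.2 hx, hsub x hx⟩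
      have h1 : prods.toFinset.card ≤ (V.erase (q * f)).card := Finset.card_le_card hsubset
      rw [List.toFinset_card_of_nodup hnd] at h1
      have h2 : (V.erase (q * f)).card = V.card - 1 := Finset.card_erase_of_mem hpV
      have h3 : 1 ≤ V.card := Finset.card_pos.2 ⟨_, hpV⟩
      omega
    · rw [if_neg hc]
      refine ⟨[], by simp, hnd, hsub, ?_⟩
      intro hple
      by_contra hnotin
      exact hc ⟨hple, hnotin⟩
  | succ n ih =>
    rw [chainA]
    by_cases hc : p ≤ limit ∧ p ∉ prods
    · rw [if_pos hc]
      obtain ⟨q, hq, hpe⟩ := hp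
      have hpV : p ∈ V := hpe ▸ hV q (hsub q hq) (hpe ▸ hc.1)
      obtain ⟨ext, he, hnd', hsub', hmem'⟩ := ih (p * f) (prods ++ [p])
        (by intro x hx; rcases List.mem_append.1 hx with h | h
            · exact hsub x h
            · simp at h; subst h; exact hpV)
        (by rw [List.nodup_append]
            refine ⟨hnd, List.nodup_singleton _, ?_⟩
            intro a ha b hb
            simp at hb
            subst hb
            intro h
            exact hc.2 (h ▸ ha))
        ⟨p, by simp, rfl⟩
        (by simp; omega)
      refine ⟨p :: ext, by simpa using he, hnd', hsub', ?_⟩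
      intro _
      rw [he]
      exact List.mem_append.2 (Or.inl (by simp))
    · rw [if_neg hc]
      refine ⟨[], by simp, hnd, hsub, ?_⟩
      intro hple
      by_contra hnotin
      exact hc ⟨hple, hnotin⟩

-- loopA: under sufficient fuel the result is closed
theorem loopA_spec (f limit : Int) (fuel : Nat) (i : Nat) (prods : List Int)
    (V : Finset Int) (hV : Closed f limit V)
    (hsub : ∀ x ∈ prods, x ∈ V) (hnd : prods.Nodup)
    (hfuel : V.card + 1 ≤ fuel + prods.length)
    (hhand : ∀ x ∈ prods.take i, x * f ≤ limit → x * f ∈ prods) :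
    ∃ ext, loopA f limit fuel i prods = prods ++ ext ∧
      (loopA f limit fuel i prods).Nodup ∧
      (∀ x ∈ loopA f limit fuel i prods, x ∈ V) ∧
      Closed f limit (loopA f limit fuel i prods).toFinset := by
  rw [loopA]; split
  · rename_i h
    obtain ⟨ext1, he1, hnd1, hsub1, hmem1⟩ :=
      chainA_spec f limit fuel (prods[i] * f) prods V hV hsub hnd
        ⟨prods[i], List.getElem_mem h, rfl⟩ hfuel
    set prods' := chainA f limit fuel (prods[i] * f) prods with hp'
    have hlen := chainA_len_le f limit fuel (prods[i] * f) prods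
    rw [← hp'] at hlen
    have hfuel' : V.card + 1 ≤ (fuel - (prods'.length - prods.length)) + prods'.length := by
      omega
    have hhand' : ∀ x ∈ prods'.take (i + 1), x * f ≤ limit → x * f ∈ prods' := by
      intro x hx hxle
      rw [he1, List.take_append_of_le_length (by omega)] at hx
      rw [List.take_succ, List.getElem?_eq_getElem h] at hx
      rcases List.mem_append.1 hx with hx | hx
      · have := hhand x hx hxle
        rw [he1]; exact List.mem_append.2 (Or.inl this)
      · have : x = prods[i] := by simpa using hx
        subst this
        exact hmem1 hxle
    obtain ⟨ext2, he2, hnd2, hsub2, hcl2⟩ :=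
      loopA_spec f limit (fuel - (prods'.length - prods.length)) (i + 1) prods'
        V hV hsub1 hnd1 hfuel' hhand'
    exact ⟨ext1 ++ ext2, by rw [he2, he1, List.append_assoc], hnd2, hsub2, hcl2⟩
  · rename_i h
    refine ⟨[], by simp, hnd, hsub, ?_⟩
    intro v hv hvle
    rw [List.mem_toFinset] at hv ⊢
    exact hhand v (by rwa [List.take_of_length_le (by omega)]) hvle
termination_by fuel + prods.length - i
decreasing_by
  have := chainA_len_le f limit fuel (prods[i] * f) prods
  omega

-- one frontier round of B (the foldl): reduction lemmas and invariants
theorem stepB_eq_pos (f limit v : Int) (s : PySem.Set Int) (acc : List Int)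
    (h1 : v * f ≤ limit) (h2 : v * f ∉ s) :
    stepB f limit (s, acc) v = (s ++ [v * f], acc ++ [v * f]) := by
  unfold stepB
  rw [if_pos ⟨h1, by simpa [PySem.Set.contains_iff] using h2⟩, PySem.Set.add_of_not_mem h2]

theorem stepB_eq_neg (f limit v : Int) (s : PySem.Set Int) (acc : List Int)
    (h : ¬ (v * f ≤ limit ∧ v * f ∉ s)) :
    stepB f limit (s, acc) v = (s, acc) := by
  unfold stepB
  rw [if_neg]
  intro hc
  exact h ⟨hc.1, by simpa [PySem.Set.contains_iff] using hc.2⟩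

theorem stepB_fold (f limit : Int) (frontier : List Int) (prods : PySem.Set Int) (acc : List Int) :
    ∃ d, (frontier.foldl (stepB f limit) (prods, acc)).1 = prods ++ d ∧
         (frontier.foldl (stepB f limit) (prods, acc)).2 = acc ++ d := by
  induction frontier generalizing prods acc with
  | nil => exact ⟨[], by simp, by simp⟩
  | cons v t ih =>
    rw [List.foldl_cons]
    by_cases hc : v * f ≤ limit ∧ v * f ∉ prods
    · rw [stepB_eq_pos f limit v prods acc hc.1 hc.2]
      obtain ⟨d, h1, h2⟩ := ih (prods ++ [v * f]) (acc ++ [v * f])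
      exact ⟨v * f :: d, by simpa using h1, by simpa using h2⟩
    · rw [stepB_eq_neg f limit v prods acc hc]
      exact ih prods acc

theorem stepB_fold_min (f limit : Int) (frontier : List Int) (prods : PySem.Set Int) (acc : List Int)
    (T : Finset Int) (hT : Closed f limit T)
    (hsT : ∀ x ∈ prods, x ∈ T) (hfT : ∀ v ∈ frontier, v ∈ T) :
    ∀ x ∈ (frontier.foldl (stepB f limit) (prods, acc)).1, x ∈ T := by
  induction frontier generalizing prods acc with
  | nil => exact hsT
  | cons v t ih =>
    rw [List.foldl_cons]
    by_cases hc : v * f ≤ limit ∧ v * f ∉ prods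
    · rw [stepB_eq_pos f limit v prods acc hc.1 hc.2]
      have hwT : v * f ∈ T := hT v (hfT v (by simp)) hc.1
      refine ih (prods ++ [v * f]) (acc ++ [v * f]) ?_ (fun w hw => hfT w (by simp [hw]))
      intro x hx
      rcases List.mem_append.1 hx with h | h
      · exact hsT x h
      · simp at h; subst h; exact hwT
    · rw [stepB_eq_neg f limit v prods acc hc]
      exact ih prods acc hsT (fun w hw => hfT w (by simp [hw]))

theorem stepB_fold_spec (f limit : Int) (frontier : List Int) (prods : PySem.Set Int) (acc : List Int)
    (V : Finset Int) (hV : Closed f limit V)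
    (hsub : ∀ x ∈ prods, x ∈ V) (hnd : prods.Nodup)
    (hfr : ∀ v ∈ frontier, v ∈ V) :
    (∀ x ∈ (frontier.foldl (stepB f limit) (prods, acc)).1, x ∈ V) ∧
    (frontier.foldl (stepB f limit) (prods, acc)).1.Nodup ∧
    (∀ v ∈ frontier, v * f ≤ limit → v * f ∈ (frontier.foldl (stepB f limit) (prods, acc)).1) := by
  induction frontier generalizing prods acc with
  | nil => exact ⟨hsub, hnd, by simp⟩
  | cons v t ih =>
    rw [List.foldl_cons]
    have hvV : v ∈ V := hfr v (by simp)
    by_cases hc : v * f ≤ limit ∧ v * f ∉ prods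
    · rw [stepB_eq_pos f limit v prods acc hc.1 hc.2]
      have hwV : v * f ∈ V := hV v hvV hc.1
      have hsub' : ∀ x ∈ prods ++ [v * f], x ∈ V := by
        intro x hx; rcases List.mem_append.1 hx with h | h
        · exact hsub x h
        · simp at h; subst h; exact hwV
      have hnd' : (prods ++ [v * f]).Nodup := by
        rw [List.nodup_append]
        refine ⟨hnd, List.nodup_singleton _, ?_⟩
        intro a ha b hb
        simp at hb
        subst hb
        intro h
        exact hc.2 (h ▸ ha)
      obtain ⟨ihV, ihnd, ihhand⟩ := ih (prods ++ [v * f]) (acc ++ [v * f]) hsub' hnd'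
        (fun w hw => hfr w (by simp [hw]))
      obtain ⟨d, hd1, _⟩ := stepB_fold f limit t (prods ++ [v * f]) (acc ++ [v * f])
      refine ⟨ihV, ihnd, ?_⟩
      intro w hw hwle
      rcases List.mem_cons.1 hw with h | hw
      · rw [hd1]
        refine List.mem_append.2 (Or.inl ?_)
        rw [h]
        simp
      · exact ihhand w hw hwle
    · rw [stepB_eq_neg f limit v prods acc hc]
      obtain ⟨ihV, ihnd, ihhand⟩ := ih prods acc hsub hnd
        (fun w hw => hfr w (by simp [hw]))
      obtain ⟨d, hd1, _⟩ := stepB_fold f limit t prods acc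
      refine ⟨ihV, ihnd, ?_⟩
      intro w hw hwle
      rcases List.mem_cons.1 hw with h | hw
      · have hvp : w * f ∈ prods := by
          rw [h]
          by_contra hni
          exact hc ⟨h ▸ hwle, hni⟩
        rw [hd1]; exact List.mem_append.2 (Or.inl hvp)
      · exact ihhand w hw hwle

-- bfsB: closedness under sufficient fuel
theorem bfsB_spec (f limit : Int) (fuel : Nat) (frontier : List Int) (prods : PySem.Set Int)
    (V : Finset Int) (hV : Closed f limit V)
    (hsub : ∀ x ∈ prods, x ∈ V) (hnd : prods.Nodup)
    (hfr : ∀ v ∈ frontier, v ∈ prods)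
    (hhand : ∀ x ∈ prods, x ∉ frontier → x * f ≤ limit → x * f ∈ prods)
    (hfuel : frontier ≠ [] → V.card + 2 ≤ fuel + prods.length) :
    ∃ ext, bfsB f limit fuel frontier prods = prods ++ ext ∧
      (bfsB f limit fuel frontier prods).Nodup ∧
      (∀ x ∈ bfsB f limit fuel frontier prods, x ∈ V) ∧
      Closed f limit (bfsB f limit fuel frontier prods).toFinset := by
  induction fuel generalizing frontier prods with
  | zero =>
    match frontier with
    | [] =>
      rw [bfsB]
      refine ⟨[], by simp, hnd, hsub, ?_⟩
      intro v hv hvle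
      rw [List.mem_toFinset] at hv ⊢
      exact hhand v hv (by simp) hvle
    | v :: t =>
      exfalso
      have h1 : prods.toFinset.card ≤ V.card :=
        Finset.card_le_card (fun x hx => hsub x (List.mem_toFinset.1 hx))
      rw [List.toFinset_card_of_nodup hnd] at h1
      have := hfuel (by simp)
      omega
  | succ n ih =>
    match frontier with
    | [] =>
      rw [bfsB]
      refine ⟨[], by simp, hnd, hsub, ?_⟩
      intro v hv hvle
      rw [List.mem_toFinset] at hv ⊢
      exact hhand v hv (by simp) hvle
    | v :: t =>
      rw [bfsB]
      obtain ⟨d, hd1, hd2⟩ := stepB_fold f limit (v :: t) prods []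
      simp only [List.nil_append] at hd2
      obtain ⟨hVn, hndn, hhandn⟩ := stepB_fold_spec f limit (v :: t) prods [] V hV hsub hnd
        (fun w hw => hsub w (hfr w hw))
      have hfr' : ∀ w ∈ ((v :: t).foldl (stepB f limit) (prods, [])).2,
          w ∈ ((v :: t).foldl (stepB f limit) (prods, [])).1 := by
        rw [hd1, hd2]
        intro w hw
        exact List.mem_append.2 (Or.inr hw)
      have hhand' : ∀ x ∈ ((v :: t).foldl (stepB f limit) (prods, [])).1,
          x ∉ ((v :: t).foldl (stepB f limit) (prods, [])).2 →
          x * f ≤ limit → x * f ∈ ((v :: t).foldl (stepB f limit) (prods, [])).1 := by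
        rw [hd1, hd2]
        intro x hx hnx hxle
        rcases List.mem_append.1 hx with hx | hx
        · by_cases hxf : x ∈ (v :: t)
          · have := hhandn x hxf hxle
            rwa [hd1] at this
          · have := hhand x hx hxf hxle
            exact List.mem_append.2 (Or.inl this)
        · exact absurd hx hnx
      have hfuel' : ((v :: t).foldl (stepB f limit) (prods, [])).2 ≠ [] →
          V.card + 2 ≤ n + ((v :: t).foldl (stepB f limit) (prods, [])).1.length := by
        rw [hd1, hd2]
        intro hdne
        have h1 : 1 ≤ d.length := by
          cases d with
          | nil => simp at hdne
          | cons _ _ => simp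
        have := hfuel (by simp)
        simp only [List.length_append]
        omega
      obtain ⟨ext, he, hnd2, hsub2, hcl2⟩ := ih _ _ hVn hndn hfr' hhand' hfuel'
      refine ⟨d ++ ext, ?_, hnd2, hsub2, hcl2⟩
      rw [he, hd1, List.append_assoc]

theorem bfsB_sub (f limit : Int) (fuel : Nat) (frontier : List Int) (prods : PySem.Set Int)
    (T : Finset Int) (hT : Closed f limit T)
    (hsub : ∀ x ∈ prods, x ∈ T) (hfr : ∀ v ∈ frontier, v ∈ prods) :
    ∀ x ∈ bfsB f limit fuel frontier prods, x ∈ T := by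
  induction fuel generalizing frontier prods with
  | zero =>
    match frontier with
    | [] => rw [bfsB]; exact hsub
    | v :: t => rw [bfsB]; exact hsub
  | succ n ih =>
    match frontier with
    | [] => rw [bfsB]; exact hsub
    | v :: t =>
      rw [bfsB]
      have hmin := stepB_fold_min f limit (v :: t) prods [] T hT hsub
        (fun w hw => hsub w (hfr w hw))
      obtain ⟨d, hd1, hd2⟩ := stepB_fold f limit (v :: t) prods []
      refine ih _ _ hmin ?_
      rw [hd1, hd2]
      intro w hw
      exact List.mem_append.2 (Or.inr (by simpa using hw))

-- maximum is determined by the element set (Python's max returns a value, not a position)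
theorem max_ext (l1 l2 : List Int) (h1 : l1 ≠ []) (hm : ∀ x : Int, x ∈ l1 ↔ x ∈ l2) :
    PySem.List.max? l1 (fun x => x) = PySem.List.max? l2 (fun x => x) := by
  cases hx1 : PySem.List.max? l1 (fun x => x) with
  | none => exact absurd ((PySem.List.max?_eq_none_iff _ _).1 hx1) h1
  | some m1 =>
    cases hx2 : PySem.List.max? l2 (fun x => x) with
    | none =>
      have h2 : l2 = [] := (PySem.List.max?_eq_none_iff _ _).1 hx2
      cases l1 with
      | nil => exact absurd rfl h1
      | cons a t => exact absurd ((hm a).1 (by simp)) (by simp [h2])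
    | some m2 =>
      have hm1 : m1 ∈ l1 := PySem.List.max?_mem hx1
      have hm2 : m2 ∈ l2 := PySem.List.max?_mem hx2
      have h12 : m1 ≤ m2 := by simpa using PySem.List.max?_isMax hx2 m1 ((hm m1).1 hm1)
      have h21 : m2 ≤ m1 := by simpa using PySem.List.max?_isMax hx1 m2 ((hm m2).2 hm2)
      rw [le_antisymm h12 h21]

theorem prodA_nonneg (l : List Int) (h : ∀ f ∈ l, 0 ≤ f) : 0 ≤ prodA l := by
  suffices H : ∀ (l : List Int), (∀ f ∈ l, 0 ≤ f) → ∀ a : Int, 0 ≤ a → 0 ≤ l.foldl (· * ·) a from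
    H l h 1 (by norm_num)
  intro l
  induction l with
  | nil => intro _ a ha; simpa using ha
  | cons f t ih =>
    intro hl a ha
    rw [List.foldl_cons]
    exact ih (fun g hg => hl g (by simp [hg])) (a * f) (mul_nonneg ha (hl f (by simp)))

theorem pvLow_le_neg_one (s : Int) : pvLow s ≤ -1 := by
  unfold pvLow
  nlinarith [Int.natCast_natAbs s, abs_nonneg s]

-- a suitable finite universe exists under Pre_ and Dom
theorem exists_V (factors : List Int) (limit : Int)
    (hDomF : ∀ f ∈ factors, -2147483648 ≤ f ∧ f ≤ 2147483648)
    (hlim : limit ≤ 2147483648)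
    (hPre : Pre_count_find_num factors limit) :
    ∃ V : Finset Int, prodA factors ∈ V ∧ (∀ f ∈ factors, Closed f limit V) ∧
      V.card + 2 ≤ pvFuel (prodA factors) limit := by
  set s := prodA factors with hs
  have habs : ((s.natAbs : Int)) = |s| := Int.natCast_natAbs s
  rcases hPre with hpos | hle1
  · refine ⟨insert s (Finset.Icc 0 limit), Finset.mem_insert_self _ _, ?_, ?_⟩
    · intro f hf q hq hqle
      have hq0 : 0 ≤ q := by
        rcases Finset.mem_insert.1 hq with rfl | hq
        · exact prodA_nonneg factors hpos
        · exact (Finset.mem_Icc.1 hq).1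
      exact Finset.mem_insert.2 (Or.inr (Finset.mem_Icc.2
        ⟨mul_nonneg hq0 (hpos f hf), hqle⟩))
    · have hL := pvLow_le_neg_one s
      have hcard : (insert s (Finset.Icc 0 limit)).card ≤ (Finset.Icc (0:Int) limit).card + 1 :=
        Finset.card_insert_le _ _
      rw [Int.card_Icc 0 limit] at hcard
      unfold pvFuel
      omega
  · refine ⟨insert s (Finset.Icc (pvLow s) limit), Finset.mem_insert_self _ _, ?_, ?_⟩
    · intro f hf q hq hqle
      have hfb := hDomF f hf
      have hf1 := hle1 f hf
      refine Finset.mem_insert.2 (Or.inr (Finset.mem_Icc.2 ⟨?_, hqle⟩))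
      -- q * f stays above pvLow s
      have habs' : -|q * f| ≤ q * f := neg_abs_le _
      rcases Finset.mem_insert.1 hq with hqs | hq
      · -- q = s
        have hb : |q * f| ≤ (|q| + 2147483648) * 2147483648 := by
          rw [abs_mul]
          nlinarith [abs_nonneg q, abs_nonneg f, abs_le.2 ⟨hfb.1, hfb.2⟩]
        unfold pvLow
        rw [habs, ← hqs]
        linarith
      · have hqIcc := Finset.mem_Icc.1 hq
        by_cases hq0 : q ≤ 0
        · by_cases hf0 : f ≤ 0
          · have h0 : 0 ≤ q * f := by nlinarith
            have := pvLow_le_neg_one s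
            omega
          · -- 0 < f ≤ 1 so f = 1
            have hf1' : f = 1 := by omega
            subst hf1'
            simpa using hqIcc.1
        · -- q > 0, q ≤ limit ≤ 2^31
          have hq0' : 0 < q := by omega
          have hqB : q ≤ 2147483648 := le_trans hqIcc.2 hlim
          have hb : |q * f| ≤ 2147483648 * 2147483648 := by
            rw [abs_mul]
            nlinarith [abs_nonneg f, abs_le.2 ⟨hfb.1, hfb.2⟩, abs_of_pos hq0']
          have habs' : -|q * f| ≤ q * f := neg_abs_le _
          have hLle : pvLow s ≤ -(2147483648 * 2147483648) := by
            unfold pvLow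
            nlinarith [Int.natCast_natAbs s, abs_nonneg s]
          linarith
    · have hcard : (insert s (Finset.Icc (pvLow s) limit)).card ≤
          (Finset.Icc (pvLow s) limit).card + 1 := Finset.card_insert_le _ _
      rw [Int.card_Icc (pvLow s) limit] at hcard
      unfold pvFuel
      omega

-- the factor-by-factor fold: both sides keep equal element sets
theorem passes_eq (limit : Int) (fuel : Nat) (V : Finset Int) :
    ∀ (l : List Int), (∀ f ∈ l, Closed f limit V) → V.card + 2 ≤ fuel →
    ∀ (pA : List Int) (pB : PySem.Set Int),
      pA.Nodup → pB.Nodup → (∀ x, x ∈ pA ↔ x ∈ pB) → pA ≠ [] → (∀ x ∈ pA, x ∈ V) →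
      (l.foldl (fun prods f => loopA f limit fuel 0 prods) pA).Nodup ∧
      (l.foldl (fun prods f => bfsB f limit fuel prods prods) pB).Nodup ∧
      (∀ x, x ∈ l.foldl (fun prods f => loopA f limit fuel 0 prods) pA ↔
            x ∈ l.foldl (fun prods f => bfsB f limit fuel prods prods) pB) ∧
      (∃ e, l.foldl (fun prods f => loopA f limit fuel 0 prods) pA = pA ++ e) ∧
      (∀ x ∈ l.foldl (fun prods f => loopA f limit fuel 0 prods) pA, x ∈ V) := by
  intro l
  induction l with
  | nil =>
    intro _ _ pA pB h1 h2 h3 h4 h5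
    exact ⟨h1, h2, h3, ⟨[], by simp⟩, h5⟩
  | cons f t ih =>
    intro hcl hfuel pA pB hndA hndB hmem hne hVA
    simp only [List.foldl_cons]
    have hclf := hcl f (by simp)
    obtain ⟨e1, heA, hndA1, hVA1, hclA1⟩ :=
      loopA_spec f limit fuel 0 pA V hclf hVA hndA (by omega) (by simp)
    have hVB : ∀ x ∈ pB, x ∈ V := fun x hx => hVA x ((hmem x).2 hx)
    obtain ⟨e2, heB, hndB1, hVB1, hclB1⟩ :=
      bfsB_spec f limit fuel pB pB V hclf hVB hndB (fun v hv => hv)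
        (fun x hx hnx _ => absurd hx hnx) (fun _ => by omega)
    have hAB : ∀ x ∈ loopA f limit fuel 0 pA, x ∈ bfsB f limit fuel pB pB := by
      intro x hx
      have := loopA_sub f limit fuel 0 pA (bfsB f limit fuel pB pB).toFinset hclB1
        (by intro y hy
            rw [List.mem_toFinset, heB]
            exact List.mem_append.2 (Or.inl ((hmem y).1 hy)))
        x hx
      exact List.mem_toFinset.1 this
    have hBA : ∀ x ∈ bfsB f limit fuel pB pB, x ∈ loopA f limit fuel 0 pA := by
      intro x hx
      have := bfsB_sub f limit fuel pB pB (loopA f limit fuel 0 pA).toFinset hclA1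
        (by intro y hy
            rw [List.mem_toFinset, heA]
            exact List.mem_append.2 (Or.inl ((hmem y).2 hy)))
        (fun v hv => hv) x hx
      exact List.mem_toFinset.1 this
    have hne1 : loopA f limit fuel 0 pA ≠ [] := by
      rw [heA]
      cases pA with
      | nil => exact absurd rfl hne
      | cons a u => simp
    obtain ⟨IH1, IH2, IH3, ⟨e3, IH4⟩, IH5⟩ :=
      ih (fun g hg => hcl g (by simp [hg])) hfuel
        (loopA f limit fuel 0 pA) (bfsB f limit fuel pB pB)
        hndA1 hndB1 (fun x => ⟨hAB x, hBA x⟩) hne1 hVA1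
    refine ⟨IH1, IH2, IH3, ⟨e1 ++ e3, ?_⟩, IH5⟩
    rw [IH4, heA, List.append_assoc]

-- ===== VERDICT (by name: the statement is the Claim_ definition above) =====
theorem count_find_num_spec : Claim_equal_count_find_num := by
  intro factors limit hDom hPre
  unfold Spec_count_find_num
  have hDom' := hDom
  unfold Dom_count_find_num at hDom'
  simp only [Bool.and_eq_true, List.all_eq_true, pvDomInt, decide_eq_true_eq] at hDom'
  obtain ⟨hDomF, hDomL⟩ := hDom'
  obtain ⟨V, hsV, hcl, hcard⟩ := exists_V factors limit
    (fun f hf => (hDomF f hf)) hDomL.2 hPre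
  set s := prodA factors with hs
  have hpasses := passes_eq limit (pvFuel s limit) V factors hcl hcard [s] [s]
    (List.nodup_singleton s) (List.nodup_singleton s) (fun x => Iff.rfl)
    (by simp) (by intro x hx; simp at hx; subst hx; exact hsV)
  obtain ⟨hnd1, hnd2, hmem, ⟨e, hpre⟩, _⟩ := hpasses
  unfold count_find_num count_find_num_alt
  simp only []
  rw [show prodB factors = prodA factors from rfl]
  rw [show PySem.Set.ofList [prodA factors] = [prodA factors] from rfl]
  rw [← hs]
  set rA := factors.foldl (fun prods f => loopA f limit (pvFuel s limit) 0 prods) [s] with hrA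
  set rB := factors.foldl (fun prods f => bfsB f limit (pvFuel s limit) prods prods) [s] with hrB
  have hhead : PySem.List.pyGetD rA 0 0 = s := by
    rw [hpre]
    simp [PySem.List.pyGetD_zero_cons]
  have hneA : rA ≠ [] := by
    rw [hpre]
    simp
  rw [hhead]
  by_cases hsl : s ≤ limit
  · rw [if_pos hsl, if_neg (by omega)]
    have hfs : rA.toFinset = rB.toFinset := by
      apply Finset.ext
      intro x
      rw [List.mem_toFinset, List.mem_toFinset]
      exact hmem x
    have hlen : rA.length = rB.length := by
      rw [← List.toFinset_card_of_nodup hnd1, ← List.toFinset_card_of_nodup hnd2, hfs]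
    have hmax := max_ext rA rB hneA hmem
    rw [PySem.List.len_eq]
    rw [show PySem.Set.len rB = (rB.length : Int) by simp [PySem.Set.len]]
    rw [hlen, hmax]
  · rw [if_neg hsl, if_pos (by omega)]
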